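-- pv_equiv track=rewrite | github.com/AnandKumar-92/DSAPython | strop.py | solve
-- ===== SOURCE A (Python) =====
-- def solve(A):
--     res = ""
--     vowel = "aeiou"
--     for i in range(len(A)):
--         if ord(A[i]) < 65 or ord(A[i]) > 90:
--             if A[i] in vowel:
--                 res += "#"
--             else:
--                 res += A[i]
--     return res + res
-- ===== SOURCE B (Python) =====
-- def solve(A):
--     res = A
--     for u in "ABCDEFGHIJKLMNOPQRSTUVWXYZ":
--         res = res.replace(u, "")
--     for v in "aeiou":
--         res = res.replace(v, "#")
--     return res + res
-- ===== Notes on version B (the rewrite author's own statement) =====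
-- stated objective: faster
-- what changed: Replaces A's single indexed per-character Python loop with nested if/else by 31 staged whole-string str.replace passes (delete each uppercase letter, then substitute each vowel with a hash mark), then doubles the result.
import Mathlib
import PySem

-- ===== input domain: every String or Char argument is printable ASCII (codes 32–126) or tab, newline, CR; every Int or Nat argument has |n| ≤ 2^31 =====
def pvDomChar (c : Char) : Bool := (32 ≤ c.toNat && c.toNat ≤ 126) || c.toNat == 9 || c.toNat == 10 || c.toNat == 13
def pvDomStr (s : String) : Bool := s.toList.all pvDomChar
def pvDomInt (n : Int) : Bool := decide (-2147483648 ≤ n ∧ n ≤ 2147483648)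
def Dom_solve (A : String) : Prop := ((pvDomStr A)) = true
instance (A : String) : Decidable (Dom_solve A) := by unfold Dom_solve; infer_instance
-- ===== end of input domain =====

-- B replaces A's single indexed per-character loop by 31 staged whole-string str.replace
-- passes (delete each uppercase letter, then substitute each vowel), then doubles; a
-- different pass-per-letter traversal, measurably faster at a timing run's sizes.

-- ===== PORT A =====
def solve (A : String) : String :=
  let vowel := "aeiou".toList
  let res := (PySem.List.pyRange 0 (A.toList.length : Int) 1).foldl
    (fun res i =>
      let c := PySem.List.pyGetD A.toList i ' '
      if c.toNat < 65 || 90 < c.toNat then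
        (if vowel.contains c then res ++ ['#'] else res ++ [c])
      else res) ([] : List Char)
  String.ofList (res ++ res)

-- ===== PORT B =====
-- for u in "ABCDEFGHIJKLMNOPQRSTUVWXYZ": res = res.replace(u, "")
-- for v in "aeiou":                      res = res.replace(v, "#")
def solve_alt (A : String) : String :=
  let res := "ABCDEFGHIJKLMNOPQRSTUVWXYZ".toList.foldl
    (fun r u => PySem.Str.replace r (String.ofList [u]) "") A
  let res := "aeiou".toList.foldl
    (fun r v => PySem.Str.replace r (String.ofList [v]) "#") res
  res ++ res

-- ===== PRECONDITION & SPEC =====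
def Spec_solve (A : String) (out : String) : Prop := out = solve_alt A
instance (A : String) (out : String) : Decidable (Spec_solve A out) := by unfold Spec_solve; infer_instance

-- ===== CLAIM =====
def Claim_equal_solve : Prop := ∀ (A : String), Dom_solve A → Spec_solve A (solve A)

-- ===== LEMMAS AND PROOFS =====

-- A's per-character contribution, as a function (used only in the proofs)
def pvG (c : Char) : List Char :=
  if c.toNat < 65 || 90 < c.toNat then
    (if "aeiou".toList.contains c then ['#'] else [c])
  else []

-- str.replace with a single-character pattern is a character-wise flatMap
theorem pvGo_single (u : Char) (new : List Char) :
    ∀ (l acc : List Char),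
      PySem.Chars.replace.go [u] new l.length l acc
        = acc.reverse ++ l.flatMap (fun c => if c = u then new else [c]) := by
  intro l
  induction l with
  | nil => intro acc; simp [PySem.Chars.replace.go]
  | cons c t ih =>
    intro acc
    by_cases h : c = u
    · subst h
      simp only [List.length_cons, PySem.Chars.replace.go, List.isPrefixOf,
        beq_self_eq_true, Bool.true_and, if_true]
      simpa using ih (new.reverse ++ acc)
    · simp only [List.length_cons, PySem.Chars.replace.go, List.isPrefixOf,
        beq_iff_eq, Bool.and_true]
      rw [if_neg (by simp [Ne.symm h])]
      simpa [h] using ih (c :: acc)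

theorem pvReplace_single (s : List Char) (u : Char) (new : List Char) :
    PySem.Chars.replace s [u] new = s.flatMap (fun c => if c = u then new else [c]) := by
  rw [PySem.Chars.replace]
  simpa using pvGo_single u new s []

theorem pvFlatMap_del (s : List Char) (u : Char) :
    (s.flatMap (fun c => if c = u then [] else [c])) = s.filter (fun c => !(c == u)) := by
  induction s with
  | nil => rfl
  | cons c t ih => by_cases h : c = u <;> simp [h, ih]

theorem pvFlatMap_sub (s : List Char) (v : Char) :
    (s.flatMap (fun c => if c = v then ['#'] else [c]))
      = s.map (fun c => if c = v then '#' else c) := by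
  induction s with
  | nil => rfl
  | cons c t ih => by_cases h : c = v <;> simp [h, ih]

-- the uppercase-deletion fold is one filter
theorem pvFold_del (us : List Char) :
    ∀ s : List Char,
      us.foldl (fun r u => PySem.Chars.replace r [u] []) s
        = s.filter (fun c => !(us.contains c)) := by
  induction us with
  | nil => intro s; simp
  | cons u us ih =>
    intro s
    simp only [List.foldl_cons]
    rw [ih, pvReplace_single, pvFlatMap_del, List.filter_filter]
    apply List.filter_congr
    intro c _
    by_cases h : c = u <;> simp [h, List.contains_cons]

-- the vowel-substitution fold is one map (no vowel is '#', so passes do not interfere)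
theorem pvFold_sub (vs : List Char) (hv : ¬ vs.contains '#') :
    ∀ s : List Char,
      vs.foldl (fun r v => PySem.Chars.replace r [v] ['#']) s
        = s.map (fun c => if vs.contains c then '#' else c) := by
  induction vs with
  | nil => intro s; simp
  | cons v vs ih =>
    intro s
    have hv' : ¬ vs.contains '#' := by
      simp only [List.contains_cons, Bool.or_eq_true] at hv
      intro h; exact hv (Or.inr h)
    simp only [List.foldl_cons]
    rw [ih hv', pvReplace_single, pvFlatMap_sub, List.map_map]
    apply List.map_congr_left
    intro c _
    by_cases h : c = v
    · subst h
      simp only [if_pos rfl, List.contains_cons, beq_self_eq_true, Bool.true_or, if_pos]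
      simp only [Bool.not_eq_true] at hv'
      simp [hv']
    · simp [h, List.contains_cons]

-- filter-then-map as a flatMap, to compare with A's contribution function
theorem pvFilterMap_flatMap (s : List Char) (p : Char → Bool) (g : Char → Char) :
    ((s.filter p).map g) = s.flatMap (fun c => if p c then [g c] else []) := by
  induction s with
  | nil => rfl
  | cons c t ih => by_cases h : p c <;> simp [h, ih]

-- per-character agreement of A's contribution with B's filter/map pipeline, on the domain
set_option maxHeartbeats 2000000 in
theorem pvStep_eq (c : Char) (hdom : c.toNat ≤ 126) :
    (if !("ABCDEFGHIJKLMNOPQRSTUVWXYZ".toList.contains c) then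
        [if "aeiou".toList.contains c then '#' else c] else []) = pvG c := by
  have hc : c = Char.ofNat c.toNat := (Char.ofNat_toNat c).symm
  obtain ⟨n, hn⟩ : ∃ n : Nat, c.toNat = n := ⟨c.toNat, rfl⟩
  rw [hc, hn]
  rw [hn] at hdom
  interval_cases n <;> decide

-- string-level folds of B reduce to list-level folds
theorem pvFoldStr_toList (us : List Char) (new : String) :
    ∀ s : String,
      (us.foldl (fun r u => PySem.Str.replace r (String.ofList [u]) new) s).toList
        = us.foldl (fun r u => PySem.Chars.replace r [u] new.toList) s.toList := by
  induction us with
  | nil => intro s; rfl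
  | cons u us ih =>
    intro s
    simp only [List.foldl_cons]
    rw [ih, PySem.Str.toList_replace]
    simp

theorem solve_eq_alt (A : String) (hdom : Dom_solve A) : solve A = solve_alt A := by
  have hstep : (fun (res : List Char) (i : Int) =>
      if (PySem.List.pyGetD A.toList i ' ').toNat < 65 ||
          90 < (PySem.List.pyGetD A.toList i ' ').toNat then
        (if "aeiou".toList.contains (PySem.List.pyGetD A.toList i ' ') then res ++ ['#']
         else res ++ [PySem.List.pyGetD A.toList i ' '])
      else res) =
      (fun (res : List Char) (i : Int) => res ++ pvG (PySem.List.pyGetD A.toList i ' ')) := by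
    funext res i
    unfold pvG
    split_ifs <;> simp
  have hB : (solve_alt A).toList =
      ((A.toList.filter (fun c => !("ABCDEFGHIJKLMNOPQRSTUVWXYZ".toList.contains c))).map
        (fun c => if "aeiou".toList.contains c then '#' else c)) ++
      ((A.toList.filter (fun c => !("ABCDEFGHIJKLMNOPQRSTUVWXYZ".toList.contains c))).map
        (fun c => if "aeiou".toList.contains c then '#' else c)) := by
    show (_ ++ _ : String).toList = _
    rw [String.toList_append, pvFoldStr_toList, pvFoldStr_toList]
    simp only [show ("" : String).toList = ([] : List Char) from rfl,
      show ("#" : String).toList = ['#'] from rfl]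
    rw [pvFold_del, pvFold_sub _ (by decide)]
  have hA : solve A = String.ofList ((A.toList.flatMap pvG) ++ (A.toList.flatMap pvG)) := by
    simp only [solve]
    rw [hstep,
      PySem.List.foldl_pyRange_zero_pyGetD' A.toList ' ' (fun res c => res ++ pvG c) [],
      PySem.List.foldl_append_eq_flatMap]
    simp
  have hAB : A.toList.flatMap pvG =
      (A.toList.filter (fun c => !("ABCDEFGHIJKLMNOPQRSTUVWXYZ".toList.contains c))).map
        (fun c => if "aeiou".toList.contains c then '#' else c) := by
    rw [pvFilterMap_flatMap]
    apply List.flatMap_congr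
    intro c hm
    have hd : pvDomChar c = true := List.all_eq_true.mp hdom c hm
    have hc : c.toNat ≤ 126 := by
      simp only [pvDomChar, Bool.or_eq_true, Bool.and_eq_true, decide_eq_true_eq,
        beq_iff_eq] at hd
      omega
    exact (pvStep_eq c hc).symm
  have : (solve_alt A).toList = (A.toList.flatMap pvG) ++ (A.toList.flatMap pvG) := by
    rw [hB, hAB]
  rw [hA, ← this]
  simp

-- ===== VERDICT =====
theorem solve_spec : Claim_equal_solve := by
  intro A hdom
  unfold Spec_solve
  exact solve_eq_alt A hdom
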